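-- pv_equiv track=rewrite | github.com/cbwinslow/jcsnotfunny | agents/swarm_orchestrator_agent.py | _get_agent_capabilities
-- ===== SOURCE A (Python) =====
-- from typing import Dict, List, Any, Optional, Callable
--
-- def _get_agent_capabilities(agent_names: List[str]) -> Dict[str, Any]:
--     """Get capabilities of specified agents."""
--     # In real implementation, this would query agent capabilities
--     capabilities = {}
--     for agent_name in agent_names:
--         if 'video' in agent_name:
--             capabilities[agent_name] = ['video_editing', 'content_creation', 'media_processing']
--         elif 'audio' in agent_name:
--             capabilities[agent_name] = ['audio_processing', 'sound_design', 'music_production']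
--         elif 'social' in agent_name:
--             capabilities[agent_name] = ['social_media', 'content_scheduling', 'engagement']
--         else:
--             capabilities[agent_name] = ['general_tasks', 'coordination']
--     return capabilities
-- ===== SOURCE B (Python) =====
-- from typing import Dict, List, Any
--
-- _OVERWRITE_RULES = [
--     ('social', ['social_media', 'content_scheduling', 'engagement']),
--     ('audio', ['audio_processing', 'sound_design', 'music_production']),
--     ('video', ['video_editing', 'content_creation', 'media_processing']),
-- ]
--
-- def _get_agent_capabilities(agent_names: List[str]) -> Dict[str, Any]:
--     """Layered overwrite: everyone starts with the default capabilities; each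
--     rule pass (lowest priority first) overwrites matching names, so the last
--     pass (video) has highest priority, matching the original elif chain."""
--     capabilities = {name: ['general_tasks', 'coordination'] for name in agent_names}
--     for keyword, caps in _OVERWRITE_RULES:
--         for name in capabilities:
--             if keyword in name:
--                 capabilities[name] = caps
--     return capabilities
-- ===== Notes on version B (the rewrite author's own statement) =====
-- stated objective: alternative
-- what changed: Inverts the loop nesting: B first assigns the default to every name, then makes one overwrite pass over the whole dict per rule in reverse priority order (social, audio, video), so the last pass wins instead of a per-name elif chain choosing the first match.
import Mathlib
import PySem

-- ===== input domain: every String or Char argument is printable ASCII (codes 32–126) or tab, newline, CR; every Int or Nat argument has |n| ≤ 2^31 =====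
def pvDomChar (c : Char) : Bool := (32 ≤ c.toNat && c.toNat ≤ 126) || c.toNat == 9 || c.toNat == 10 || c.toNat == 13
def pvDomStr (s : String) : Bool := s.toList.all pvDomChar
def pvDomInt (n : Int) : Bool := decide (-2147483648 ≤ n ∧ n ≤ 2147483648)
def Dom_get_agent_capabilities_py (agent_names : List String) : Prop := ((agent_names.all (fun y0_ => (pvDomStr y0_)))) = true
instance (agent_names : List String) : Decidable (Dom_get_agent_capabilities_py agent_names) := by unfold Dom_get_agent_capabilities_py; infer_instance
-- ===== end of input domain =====

-- B inverts the loop nesting: all names start at the default capabilities, then one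
-- overwrite pass over the whole dict per rule in reverse priority order (objective: alternative).


-- ===== PORT A =====
def get_agent_capabilities_py (agent_names : List String) : List (String × List String) :=
  (agent_names.foldl (fun (capabilities : PySem.Dict String (List String)) agent_name =>
      if PySem.Str.isIn "video" agent_name then
        capabilities.insert agent_name ["video_editing", "content_creation", "media_processing"]
      else if PySem.Str.isIn "audio" agent_name then
        capabilities.insert agent_name ["audio_processing", "sound_design", "music_production"]
      else if PySem.Str.isIn "social" agent_name then
        capabilities.insert agent_name ["social_media", "content_scheduling", "engagement"]
      else
        capabilities.insert agent_name ["general_tasks", "coordination"])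
    PySem.Dict.empty).items

-- ===== PORT B =====
-- _OVERWRITE_RULES, lowest priority first
def pvRulesB : List (String × List String) :=
  [("social", ["social_media", "content_scheduling", "engagement"]),
   ("audio", ["audio_processing", "sound_design", "music_production"]),
   ("video", ["video_editing", "content_creation", "media_processing"])]

def pvDefaultB : List String := ["general_tasks", "coordination"]

-- one rule pass: 'for name in capabilities: if keyword in name: capabilities[name] = caps'
-- (assigning an existing key rewrites the value in place, i.e. one map over the pairs)
def pvPassB (keyword : String) (caps : List String)
    (st : List (String × List String)) : List (String × List String) :=
  st.map (fun p => if PySem.Str.isIn keyword p.1 then (p.1, caps) else p)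

def get_agent_capabilities_py_alt (agent_names : List String) : List (String × List String) :=
  -- {name: default for name in agent_names}  (dict comprehension = ordered dedup, all default)
  pvRulesB.foldl (fun st r => pvPassB r.1 r.2 st)
    ((PySem.List.dedup agent_names).map (fun n => (n, pvDefaultB)))

-- ===== PRECONDITION & SPEC =====
def Spec_get_agent_capabilities_py (agent_names : List String) (out : List (String × List String)) : Prop := out = get_agent_capabilities_py_alt agent_names
instance (agent_names : List String) (out : List (String × List String)) : Decidable (Spec_get_agent_capabilities_py agent_names out) := by unfold Spec_get_agent_capabilities_py; infer_instance

-- ===== CLAIM (what is proved, stated in full; the proofs are below) =====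
def Claim_equal_get_agent_capabilities_py : Prop := ∀ (agent_names : List String), Dom_get_agent_capabilities_py agent_names → Spec_get_agent_capabilities_py agent_names (get_agent_capabilities_py agent_names)

-- ===== LEMMAS AND PROOFS =====

-- A's per-name elif chain, as a function of the name.
def pvChain (n : String) : List String :=
  if PySem.Str.isIn "video" n then ["video_editing", "content_creation", "media_processing"]
  else if PySem.Str.isIn "audio" n then ["audio_processing", "sound_design", "music_production"]
  else if PySem.Str.isIn "social" n then ["social_media", "content_scheduling", "engagement"]
  else ["general_tasks", "coordination"]

-- In a fold whose every insert stores f of the key, every stored value is f of its key.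
theorem get?_foldl_insert_fn (f : String → List String) (l : List String)
    (d : PySem.Dict String (List String)) (hv : ∀ p ∈ d.items, p.2 = f p.1) :
    ∀ k v, ((l.foldl (fun d n => d.insert n (f n)) d).get? k = some v) → v = f k := by
  induction l generalizing d with
  | nil =>
    intro k v h
    have hm := PySem.Dict.mem_items_of_get?_eq_some _ h
    exact hv _ hm
  | cons x xs ih =>
    intro k v h
    refine ih (d.insert x (f x)) ?_ k v h
    intro p hp
    rcases (PySem.Dict.mem_items_insert _ _ _ _).1 hp with h1 | ⟨h2, _⟩
    · subst h1; rfl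
    · exact hv _ h2

theorem foldl_insert_fn_items (f : String → List String) (l : List String) :
    (l.foldl (fun d n => d.insert n (f n)) PySem.Dict.empty).items
      = (PySem.List.dedup l).map (fun n => (n, f n)) := by
  set D := l.foldl (fun d n => d.insert n (f n)) PySem.Dict.empty with hD
  have hnd : D.keys.Nodup := by
    exact PySem.Dict.nodup_keys_foldl_insert l _ PySem.Dict.empty PySem.Dict.nodup_keys_empty
  have hkeys : D.keys = PySem.List.dedup l := by
    rw [hD, PySem.Dict.keys_foldl_insert]
    simp [PySem.Dict.keys_empty, PySem.List.dedup_eq_ofList]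
    rfl
  have hitems := PySem.Dict.items_eq_map_keys D hnd pvDefaultB
  rw [hitems, hkeys]
  apply List.map_congr_left
  intro k hk
  have hk' : k ∈ D.keys := by rw [hkeys]; exact hk
  have hc : D.contains k = true := (PySem.Dict.contains_iff_mem_keys _ _).2 hk'
  have hsome : (D.get? k).isSome := by rw [← PySem.Dict.contains_eq_isSome_get?]; exact hc
  obtain ⟨v, hvk⟩ := Option.isSome_iff_exists.1 hsome
  have hval : v = f k := get?_foldl_insert_fn f l PySem.Dict.empty (by intro p hp; simp [PySem.Dict.empty] at hp) k v (hD ▸ hvk)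
  have hDk : D.getD k pvDefaultB = v := by
    rw [PySem.Dict.getD_eq_get?_getD, hvk]; rfl
  rw [hDk, hval]

-- The three overwrite passes, composed pointwise, equal A's elif chain.
theorem passes_eq_chain (l : List String) :
    pvRulesB.foldl (fun st r => pvPassB r.1 r.2 st)
        ((PySem.List.dedup l).map (fun n => (n, pvDefaultB)))
      = (PySem.List.dedup l).map (fun n => (n, pvChain n)) := by
  simp only [pvRulesB, List.foldl_cons, List.foldl_nil, pvPassB, List.map_map]
  apply List.map_congr_left
  intro n _
  simp only [Function.comp]
  cases hv : PySem.Str.isIn "video" n <;>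
    cases ha : PySem.Str.isIn "audio" n <;>
      cases hs : PySem.Str.isIn "social" n <;>
        simp only [pvChain, pvDefaultB, hv, ha, hs, if_false, Bool.false_eq_true, if_pos]

-- ===== VERDICT (by name: the statement is the Claim_ definition above) =====
theorem get_agent_capabilities_py_spec : Claim_equal_get_agent_capabilities_py := by
  intro agent_names _
  show get_agent_capabilities_py agent_names = get_agent_capabilities_py_alt agent_names
  unfold get_agent_capabilities_py get_agent_capabilities_py_alt
  have hbody : (fun (d : PySem.Dict String (List String)) n =>
      if PySem.Str.isIn "video" n then
        d.insert n ["video_editing", "content_creation", "media_processing"]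
      else if PySem.Str.isIn "audio" n then
        d.insert n ["audio_processing", "sound_design", "music_production"]
      else if PySem.Str.isIn "social" n then
        d.insert n ["social_media", "content_scheduling", "engagement"]
      else d.insert n ["general_tasks", "coordination"])
      = (fun d n => d.insert n (pvChain n)) := by
    funext d n
    unfold pvChain
    split_ifs <;> rfl
  rw [hbody, foldl_insert_fn_items, passes_eq_chain]
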